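-- pv_equiv track=rewrite | github.com/DMGiulioRomano/PGE-ls | granular_ls/yaml_analyzer.py | _build_parent_path
-- ===== SOURCE A (Python) =====
-- from typing import List
--
-- INDENT_SIZE = 2
--
-- def _build_parent_path(lines: list, current_line_idx: int,
--                        current_indent: int) -> List[str]:
--     """
--     Risale le righe precedenti per costruire il parent_path.
--     Si ferma al marcatore lista '- ' senza attraversarlo.
--     """
--     if current_indent == 0:
--         return []
--
--     path = []
--     target_indent = current_indent - 1
--
--     for i in range(current_line_idx - 1, -1, -1):
--         raw_line = lines[i]
--         stripped = raw_line.strip()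
--         if not stripped or stripped.startswith('#'):
--             continue
--
--         line_leading = len(raw_line) - len(raw_line.lstrip())
--         line_indent = line_leading // INDENT_SIZE
--
--         # Marcatore lista: fermiamo solo se e' a indent 1 (marcatore stream).
--         # I '- ' profondi sono breakpoints envelope, non stream markers.
--         # Distinguiamo stream markers ('- chiave: ...') da breakpoints ('- [' o '- {').
--         if stripped.startswith('- ') or stripped == '-':
--             after_dash = stripped[2:].strip() if stripped.startswith('- ') else ''
--             is_breakpoint = after_dash.startswith('[') or after_dash.startswith('{')
--             if line_leading == 2 and not is_breakpoint:
--                 break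
--             continue
--
--         if line_indent == target_indent:
--             line_clean = stripped.split('#')[0].rstrip()
--             if line_clean.endswith(':'):
--                 key = line_clean[:-1].strip()
--                 if key.startswith('- '):
--                     key = key[2:].strip()
--                 if key:
--                     path.insert(0, key)
--                 if target_indent == 0:
--                     break
--                 target_indent -= 1
--
--     return path
-- ===== SOURCE B (Python) =====
-- # B: two staged passes — classify every line into an event (None=skip, 'stop',
-- # or (indent, key)), then fold a step function with a done-flag state over the
-- # reversed event list; no index arithmetic, no in-place insert.
-- from typing import List
--
--
-- def _classify(raw: str):
--     stripped = raw.strip()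
--     if not stripped or stripped.startswith('#'):
--         return None
--     leading = len(raw) - len(raw.lstrip())
--     if stripped.startswith('- ') or stripped == '-':
--         after = stripped[2:].strip() if stripped.startswith('- ') else ''
--         if leading == 2 and not (after.startswith('[') or after.startswith('{')):
--             return 'stop'
--         return None
--     clean = stripped.split('#')[0].rstrip()
--     if not clean.endswith(':'):
--         return None
--     key = clean[:-1].strip()
--     if key.startswith('- '):
--         key = key[2:].strip()
--     return (leading // 2, key)
--
--
-- def _step(st, ev):
--     done, t, p = st
--     if done or ev is None:
--         return st
--     if ev == 'stop':
--         return (True, t, p)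
--     ind, key = ev
--     if ind != t:
--         return st
--     p2 = [key] + p if key else p
--     return (True, t, p2) if t == 0 else (False, t - 1, p2)
--
--
-- def _build_parent_path(lines: list, current_line_idx: int,
--                        current_indent: int) -> List[str]:
--     if current_indent == 0:
--         return []
--     events = [_classify(l) for l in lines[:max(current_line_idx, 0)]]
--     st = (False, current_indent - 1, [])
--     for ev in reversed(events):
--         st = _step(st, ev)
--     return st[2]
-- ===== Notes on version B (the rewrite author's own statement) =====
-- stated objective: alternative
-- what changed: B replaces A's backward index loop that mutates a path and decrements target in place by a staged pipeline: one map pass classifying every preceding line into an event value (skip / stop / (indent,key)), then a fold of a pure step function with a done-flag state over the reversed event list.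
import Mathlib
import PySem

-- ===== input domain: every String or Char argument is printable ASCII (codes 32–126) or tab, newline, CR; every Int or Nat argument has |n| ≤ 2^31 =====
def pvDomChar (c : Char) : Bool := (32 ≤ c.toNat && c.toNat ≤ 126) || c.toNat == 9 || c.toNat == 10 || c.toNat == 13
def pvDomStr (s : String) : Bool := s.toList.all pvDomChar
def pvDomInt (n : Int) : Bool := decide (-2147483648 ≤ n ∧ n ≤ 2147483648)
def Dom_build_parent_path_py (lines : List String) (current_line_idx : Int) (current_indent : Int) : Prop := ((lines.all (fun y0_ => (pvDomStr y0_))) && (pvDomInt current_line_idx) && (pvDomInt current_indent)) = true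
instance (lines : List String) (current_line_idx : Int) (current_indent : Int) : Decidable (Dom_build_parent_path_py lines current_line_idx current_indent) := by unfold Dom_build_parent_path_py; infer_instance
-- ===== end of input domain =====

-- B is a staged pipeline (classify every line into an event, then fold a pure step
-- function with a done flag over the reversed events) instead of A's backward index
-- loop with in-place path/target updates; objective: alternative decomposition.

-- ===== PORT A =====
-- A's backward index loop: state (path, target); 'break' returns path immediately.
def pvALoop (lines : List String) : List Int → List String → Int → List String
  | [], path, _ => path
  | i :: rest, path, target =>
    let raw := PySem.List.pyGetD lines i ""   -- lines[i]; i out of range excluded by Pre_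
    let stripped := PySem.Str.strip raw
    if PySem.Str.len stripped = 0 ∨ PySem.Str.startswith stripped "#" then
      pvALoop lines rest path target
    else
      let lineLeading := PySem.Str.len raw - PySem.Str.len (PySem.Str.lstrip raw)
      let lineIndent := PySem.Int.floordiv lineLeading 2
      if PySem.Str.startswith stripped "- " ∨ stripped = "-" then
        let afterDash := if PySem.Str.startswith stripped "- " then
            PySem.Str.strip (PySem.Str.slice stripped (some 2) none) else ""
        let isBreakpoint := PySem.Str.startswith afterDash "[" ∨ PySem.Str.startswith afterDash "{"
        if lineLeading = 2 ∧ ¬ isBreakpoint then path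
        else pvALoop lines rest path target
      else
        if lineIndent = target then
          let lineClean := PySem.Str.rstrip (((PySem.Str.split? stripped "#").getD []).headD "")
          if PySem.Str.endswith lineClean ":" then
            let key0 := PySem.Str.strip (PySem.Str.slice lineClean none (some (-1)))
            let key := if PySem.Str.startswith key0 "- " then
                PySem.Str.strip (PySem.Str.slice key0 (some 2) none) else key0
            let path' := if PySem.Str.len key = 0 then path else key :: path
            if target = 0 then path' else pvALoop lines rest path' (target - 1)
          else pvALoop lines rest path target
        else pvALoop lines rest path target

def build_parent_path_py (lines : List String) (current_line_idx : Int) (current_indent : Int) : List String :=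
  if current_indent = 0 then []
  else pvALoop lines (PySem.List.pyRange (current_line_idx - 1) (-1) (-1)) [] (current_indent - 1)

-- ===== PORT B =====
-- Source B's _classify: one line → one event (skip / stop / entry indent key).
inductive PvEvent where
  | skip : PvEvent
  | stop : PvEvent
  | entry : Int → String → PvEvent
deriving DecidableEq, Repr

def pvClassify (raw : String) : PvEvent :=
  let stripped := PySem.Str.strip raw
  if PySem.Str.len stripped = 0 ∨ PySem.Str.startswith stripped "#" then PvEvent.skip
  else
    let leading := PySem.Str.len raw - PySem.Str.len (PySem.Str.lstrip raw)
    if PySem.Str.startswith stripped "- " ∨ stripped = "-" then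
      let after := if PySem.Str.startswith stripped "- " then
          PySem.Str.strip (PySem.Str.slice stripped (some 2) none) else ""
      if leading = 2 ∧ ¬ (PySem.Str.startswith after "[" ∨ PySem.Str.startswith after "{") then
        PvEvent.stop
      else PvEvent.skip
    else
      let clean := PySem.Str.rstrip (((PySem.Str.split? stripped "#").getD []).headD "")
      if ¬ PySem.Str.endswith clean ":" then PvEvent.skip
      else
        let key0 := PySem.Str.strip (PySem.Str.slice clean none (some (-1)))
        let key := if PySem.Str.startswith key0 "- " then
            PySem.Str.strip (PySem.Str.slice key0 (some 2) none) else key0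
        PvEvent.entry (PySem.Int.floordiv leading 2) key

-- Source B's _step: pure state transition on (done, target, path).
def pvStep (st : Bool × Int × List String) (ev : PvEvent) : Bool × Int × List String :=
  match st, ev with
  | (true, t, p), _ => (true, t, p)
  | (false, t, p), PvEvent.skip => (false, t, p)
  | (false, t, p), PvEvent.stop => (true, t, p)
  | (false, t, p), PvEvent.entry ind key =>
    if ind ≠ t then (false, t, p)
    else
      let p2 := if PySem.Str.len key = 0 then p else key :: p
      if t = 0 then (true, t, p2) else (false, t - 1, p2)

def build_parent_path_py_alt (lines : List String) (current_line_idx : Int) (current_indent : Int) : List String :=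
  if current_indent = 0 then []
  else
    let events := (PySem.List.slice lines none (some (max current_line_idx 0))).map pvClassify
    (events.reverse.foldl pvStep (false, current_indent - 1, [])).2.2

-- ===== PRECONDITION & SPEC =====
-- Pre_ excludes exactly the inputs where A raises IndexError: current_indent ≠ 0 and
-- current_line_idx past the end of lines (the loop then reads lines[current_line_idx-1]).
def Pre_build_parent_path_py (lines : List String) (current_line_idx : Int) (current_indent : Int) : Prop :=
  current_indent = 0 ∨ current_line_idx ≤ lines.length
instance (lines : List String) (current_line_idx : Int) (current_indent : Int) : Decidable (Pre_build_parent_path_py lines current_line_idx current_indent) := by unfold Pre_build_parent_path_py; infer_instance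

def pvWitness_build_parent_path_py : List String × Int × Int := (["a:", "  b:"], 2, 2)

def Spec_build_parent_path_py (lines : List String) (current_line_idx : Int) (current_indent : Int) (out : List String) : Prop := out = build_parent_path_py_alt lines current_line_idx current_indent
instance (lines : List String) (current_line_idx : Int) (current_indent : Int) (out : List String) : Decidable (Spec_build_parent_path_py lines current_line_idx current_indent out) := by unfold Spec_build_parent_path_py; infer_instance

-- ===== CLAIM (what is proved, stated in full; the proofs are below) =====
def Claim_equal_build_parent_path_py : Prop := ∀ (lines : List String) (current_line_idx : Int) (current_indent : Int), Dom_build_parent_path_py lines current_line_idx current_indent → Pre_build_parent_path_py lines current_line_idx current_indent → Spec_build_parent_path_py lines current_line_idx current_indent (build_parent_path_py lines current_line_idx current_indent)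

-- ===== LEMMAS AND PROOFS =====

-- Once the done flag is set, the fold leaves the state untouched.
theorem pv_done_fixed (l : List PvEvent) (t : Int) (p : List String) :
    l.foldl pvStep (true, t, p) = (true, t, p) := by
  induction l with
  | nil => rfl
  | cons e es ih => simpa [pvStep] using ih

-- Peeling the first event off the fold: a done result freezes, otherwise recurse.
theorem pv_fold_head (E : PvEvent) (R : List PvEvent) (target : Int) (path : List String) :
    (R.foldl pvStep (pvStep (false, target, path) E)).2.2 =
      (match pvStep (false, target, path) E with
       | (true, _, p) => p
       | (false, t', p') => (R.foldl pvStep (false, t', p')).2.2) := by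
  rcases h : pvStep (false, target, path) E with ⟨b, t', p'⟩
  cases b
  · rfl
  · rw [pv_done_fixed]

-- One step of A's loop is exactly one pvStep on the classified head line.
set_option maxHeartbeats 2000000 in
theorem pv_step_head (lines : List String) (m : Nat) (hm : m < lines.length)
    (rest : List Int) (path : List String) (target : Int) :
    pvALoop lines ((m : Int) :: rest) path target =
      (match pvStep (false, target, path) (pvClassify lines[m]) with
       | (true, _, p) => p
       | (false, t', p') => pvALoop lines rest p' t') := by
  simp only [pvALoop, pvClassify, PySem.List.pyGetD_natCast,
    List.getD_eq_getElem?_getD, List.getElem?_eq_getElem hm, Option.getD_some]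
  split_ifs <;> (try simp only [pvStep]) <;> (try split_ifs) <;> first | rfl | omega

-- A's loop over indices n-1 … 0 equals B's fold over the reversed classified prefix.
theorem pv_loop_eq (lines : List String) :
    ∀ (n : Nat), n ≤ lines.length →
    ∀ (path : List String) (target : Int),
      pvALoop lines (PySem.List.pyRange ((n : Int) - 1) (-1) (-1)) path target
        = (((lines.take n).map pvClassify).reverse.foldl pvStep (false, target, path)).2.2 := by
  intro n
  induction n generalizing lines with
  | zero =>
    intro _ path target
    rw [PySem.List.pyRange_neg_one_eq_nil (by omega)]
    simp [pvALoop]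
  | succ m ih =>
    intro hlen path target
    have hm : m < lines.length := by omega
    rw [show ((m + 1 : Nat) : Int) - 1 = (m : Int) by push_cast; ring]
    rw [PySem.List.pyRange_neg_one_cons (by omega)]
    have h2 : lines.take (m + 1) = lines.take m ++ [lines[m]] := by
      rw [List.take_add_one]; simp [List.getElem?_eq_getElem hm]
    rw [h2, List.map_append, List.reverse_append]
    simp only [List.map_cons, List.map_nil, List.reverse_singleton, List.singleton_append,
      List.foldl_cons]
    rw [pv_step_head lines m hm, pv_fold_head]
    rcases hs : pvStep (false, target, path) (pvClassify lines[m]) with ⟨b, t', p'⟩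
    cases b
    · exact ih lines (by omega) p' t'
    · rfl

-- ===== VERDICT (by name: the statement is the Claim_ definition above) =====
theorem build_parent_path_py_spec : Claim_equal_build_parent_path_py := by
  intro lines cidx cind _ hpre
  unfold Spec_build_parent_path_py build_parent_path_py build_parent_path_py_alt
  by_cases h0 : cind = 0
  · simp [h0]
  · simp only [if_neg h0]
    rcases hpre with h | hle
    · exact absurd h h0
    by_cases hneg : cidx ≤ 0
    · rw [PySem.List.pyRange_neg_one_eq_nil (by omega)]
      have : max cidx 0 = (0 : Int) := by omega
      rw [this, PySem.List.slice_to (hb := by omega)]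
      simp [pvALoop]
    · have hmax : max cidx 0 = cidx := by omega
      have hc : ((cidx.toNat : Int)) = cidx := by omega
      rw [hmax, PySem.List.slice_to (hb := by omega)]
      have := pv_loop_eq lines cidx.toNat (by omega) [] (cind - 1)
      rw [hc] at this
      simpa using this
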